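-- pv_equiv track=rewrite | github.com/jas212-on/adaptive-learning-agent | backend/server.py | _domain_base_score
-- ===== SOURCE A (Python) =====
-- _TRUSTED_DOMAINS: dict[str, int] = {
--     # Official / reference (general)
--     "wikipedia.org": 55,
--     "britannica.com": 55,
--     "openstax.org": 65,
--     "khanacademy.org": 65,
--     "mit.edu": 55,
--     "ocw.mit.edu": 75,
--     "coursera.org": 40,
--     "edx.org": 40,
--
--     # Science / biology (examples)
--     "ncbi.nlm.nih.gov": 80,
--     "nih.gov": 70,
--     "genome.gov": 70,
--     "nature.com": 55,
--     "science.org": 55,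
--
--     # Programming (keep)
--     "python.org": 120,
--     "docs.python.org": 140,
--     "developer.mozilla.org": 70,
--     "freecodecamp.org": 90,
--     "realpython.com": 80,
--     "w3schools.com": 35,
-- }
--
-- _DOMAIN_BLOCKLIST: set[str] = {
--     "reddit.com",
--     "quora.com",
--     "pinterest.com",
--     "facebook.com",
--     "instagram.com",
--     "tiktok.com",
--     "x.com",
--     "twitter.com",
-- }
--
-- def _domain_base_score(domain: str) -> int:
--     if not domain:
--         return 0
--     for bad in _DOMAIN_BLOCKLIST:
--         if domain == bad or domain.endswith("." + bad):
--             return -999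
--     base = 0
--     for trusted, pts in _TRUSTED_DOMAINS.items():
--         if domain == trusted or domain.endswith("." + trusted):
--             base = max(base, pts)
--     # Generic trust for academic/government sites
--     if base <= 0 and (domain.endswith(".edu") or domain.endswith(".gov")):
--         base = 55
--     return base
-- ===== SOURCE B (Python) =====
-- _TRUSTED_DOMAINS: dict[str, int] = {
--     "wikipedia.org": 55,
--     "britannica.com": 55,
--     "openstax.org": 65,
--     "khanacademy.org": 65,
--     "mit.edu": 55,
--     "ocw.mit.edu": 75,
--     "coursera.org": 40,
--     "edx.org": 40,
--     "ncbi.nlm.nih.gov": 80,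
--     "nih.gov": 70,
--     "genome.gov": 70,
--     "nature.com": 55,
--     "science.org": 55,
--     "python.org": 120,
--     "docs.python.org": 140,
--     "developer.mozilla.org": 70,
--     "freecodecamp.org": 90,
--     "realpython.com": 80,
--     "w3schools.com": 35,
-- }
--
-- _DOMAIN_BLOCKLIST: set[str] = {
--     "reddit.com",
--     "quora.com",
--     "pinterest.com",
--     "facebook.com",
--     "instagram.com",
--     "tiktok.com",
--     "x.com",
--     "twitter.com",
-- }
--
-- def _domain_base_score(domain: str) -> int:
--     # Enumerate the dot-delimited suffixes of the domain and look each one up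
--     # directly, instead of scanning the trust/block tables.
--     suffixes = [domain] + [domain[i + 1:] for i, ch in enumerate(domain) if ch == "."]
--     if any(s in _DOMAIN_BLOCKLIST for s in suffixes):
--         return -999
--     base = 0
--     for s in suffixes:
--         base = max(base, _TRUSTED_DOMAINS.get(s, 0))
--     if base <= 0 and (domain.endswith(".edu") or domain.endswith(".gov")):
--         base = 55
--     return base
-- ===== Notes on version B (the rewrite author's own statement) =====
-- stated objective: idiomatic
-- what changed: B enumerates the dot-delimited suffixes of the input domain and looks each up directly in the blocklist set and the trusted dict (taking the max of the hits), instead of A's two scans over the whole tables testing string equality/endswith per entry.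
import Mathlib
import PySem

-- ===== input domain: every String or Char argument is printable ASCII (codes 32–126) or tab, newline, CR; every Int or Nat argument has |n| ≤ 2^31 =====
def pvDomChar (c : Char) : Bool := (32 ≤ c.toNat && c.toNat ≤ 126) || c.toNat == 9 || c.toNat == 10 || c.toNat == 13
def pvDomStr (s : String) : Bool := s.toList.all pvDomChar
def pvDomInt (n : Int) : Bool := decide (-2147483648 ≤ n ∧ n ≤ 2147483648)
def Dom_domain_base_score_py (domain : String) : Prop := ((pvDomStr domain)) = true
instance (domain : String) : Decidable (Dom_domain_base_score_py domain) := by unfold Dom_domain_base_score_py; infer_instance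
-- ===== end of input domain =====

-- B replaces A's two scans over the trust/block tables by enumerating the dot-delimited
-- suffixes of the input and looking each one up directly (objective: idiomatic).

-- module-level tables shared by both versions (the dict as an insertion-ordered assoc list,
-- the set as its distinct elements)
def pvTrusted : List (String × Int) :=
  [("wikipedia.org", 55), ("britannica.com", 55), ("openstax.org", 65), ("khanacademy.org", 65),
   ("mit.edu", 55), ("ocw.mit.edu", 75), ("coursera.org", 40), ("edx.org", 40),
   ("ncbi.nlm.nih.gov", 80), ("nih.gov", 70), ("genome.gov", 70), ("nature.com", 55),
   ("science.org", 55), ("python.org", 120), ("docs.python.org", 140),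
   ("developer.mozilla.org", 70), ("freecodecamp.org", 90), ("realpython.com", 80),
   ("w3schools.com", 35)]

def pvBlock : List String :=
  ["reddit.com", "quora.com", "pinterest.com", "facebook.com", "instagram.com",
   "tiktok.com", "x.com", "twitter.com"]

-- ===== PORT A =====
def domain_base_score_py (domain : String) : Int :=
  if domain = "" then 0
  else if pvBlock.any (fun bad => domain == bad || PySem.Str.endswith domain ("." ++ bad)) then
    -999
  else
    let base := pvTrusted.foldl
      (fun base p => if domain == p.1 || PySem.Str.endswith domain ("." ++ p.1) then max base p.2 else base) 0
    if base ≤ 0 && (PySem.Str.endswith domain ".edu" || PySem.Str.endswith domain ".gov") then 55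
    else base

-- ===== PORT B =====
def pvTrustedDict : PySem.Dict String Int := PySem.Dict.mk pvTrusted

def pvBlockSet : PySem.Set String := PySem.Set.ofList pvBlock

-- suffixes = [domain] + [domain[i+1:] for i, ch in enumerate(domain) if ch == "."]
def pvSuffixes (domain : String) : List String :=
  domain :: (PySem.List.enumerate domain.toList).foldl
    (fun acc p => if p.2 == '.' then acc ++ [PySem.Str.slice domain (some (p.1 + 1)) none] else acc) []

def domain_base_score_py_alt (domain : String) : Int :=
  let suffixes := pvSuffixes domain
  if suffixes.any (fun s => PySem.Set.contains pvBlockSet s) then -999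
  else
    let base := suffixes.foldl (fun base s => max base (PySem.Dict.getD pvTrustedDict s 0)) 0
    if base ≤ 0 && (PySem.Str.endswith domain ".edu" || PySem.Str.endswith domain ".gov") then 55
    else base

-- ===== PRECONDITION & SPEC =====
def Spec_domain_base_score_py (domain : String) (out : Int) : Prop := out = domain_base_score_py_alt domain
instance (domain : String) (out : Int) : Decidable (Spec_domain_base_score_py domain out) := by unfold Spec_domain_base_score_py; infer_instance

-- ===== CLAIM (what is proved, stated in full; the proofs are below) =====
def Claim_equal_domain_base_score_py : Prop := ∀ (domain : String), Dom_domain_base_score_py domain → Spec_domain_base_score_py domain (domain_base_score_py domain)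

-- ===== LEMMAS AND PROOFS =====

-- a running max starting at b stays below any upper bound of b and the mapped elements
lemma pv_foldl_max_le {α : Type} (l : List α) (f : α → Int) :
    ∀ (b U : Int), b ≤ U → (∀ x ∈ l, f x ≤ U) →
      l.foldl (fun acc x => max acc (f x)) b ≤ U := by
  induction l with
  | nil => intro b U hb _; simpa using hb
  | cons x t ih =>
      intro b U hb h
      simp only [List.foldl_cons]
      exact ih _ _ (max_le hb (h x (by simp))) (fun y hy => h y (by simp [hy]))

-- '.'-headed suffixes of l are exactly the drops just after a '.'
lemma pv_dot_suffix_iff (l u : List Char) :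
    ('.' :: u <:+ l) ↔ ∃ k, ∃ _ : k < l.length, l[k] = '.' ∧ u = l.drop (k + 1) := by
  constructor
  · rintro ⟨p, rfl⟩
    refine ⟨p.length, by simp, ?_, ?_⟩
    · simp
    · simp
  · rintro ⟨k, hk, hdot, rfl⟩
    have hdrop : l.drop k = '.' :: l.drop (k + 1) := by
      rw [List.drop_eq_getElem_cons hk, hdot]
    exact hdrop ▸ List.drop_suffix k l

lemma pv_mem_suffixes_iff (domain t : String) :
    t ∈ pvSuffixes domain ↔ t = domain ∨ '.' :: t.toList <:+ domain.toList := by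
  unfold pvSuffixes
  rw [PySem.List.foldl_append_if (p := fun p : Int × Char => p.2 == '.')
        (f := fun p : Int × Char => PySem.Str.slice domain (some (p.1 + 1)) none)]
  simp only [List.nil_append, List.mem_cons, List.mem_map, List.mem_filter,
    PySem.List.mem_enumerate_iff, pv_dot_suffix_iff]
  constructor
  · rintro (rfl | ⟨p, ⟨⟨k, hk, rfl⟩, hdot⟩, rfl⟩)
    · exact Or.inl rfl
    · refine Or.inr ⟨k, hk, by simpa using hdot, ?_⟩
      have : ((0 : Int) + (k : Int) + 1) = ((k + 1 : Nat) : Int) := by push_cast; ring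
      rw [PySem.Str.toList_slice, PySem.Chars.slice_eq_listSlice, this,
        PySem.List.slice_from domain.toList (by positivity)]
      simp
  · rintro (rfl | ⟨k, hk, hdot, hu⟩)
    · exact Or.inl rfl
    · refine Or.inr ⟨((0 : Int) + (k : Int), '.'), ⟨⟨k, hk, by rw [hdot]⟩, by simp⟩, ?_⟩
      have hcast : ((0 : Int) + (k : Int) + 1) = ((k + 1 : Nat) : Int) := by push_cast; ring
      have h2 : (PySem.Str.slice domain (some ((0:Int) + (k:Int) + 1)) none).toList
          = domain.toList.drop (k + 1) := by
        rw [PySem.Str.toList_slice, PySem.Chars.slice_eq_listSlice, hcast,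
          PySem.List.slice_from domain.toList (by positivity)]
        simp
      exact String.toList_inj.mp (by rw [h2, hu])

-- A's per-entry test ('domain == t or domain.endswith("." + t)') is suffix-membership
lemma pv_matches_eq (domain t : String) :
    (domain == t || PySem.Str.endswith domain ("." ++ t)) = decide (t ∈ pvSuffixes domain) := by
  rw [Bool.eq_iff_iff]
  simp only [Bool.or_eq_true, beq_iff_eq, decide_eq_true_eq, pv_mem_suffixes_iff,
    PySem.Str.endswith_eq, PySem.Chars.endswith_iff]
  constructor
  · rintro (rfl | h)
    · exact Or.inl rfl
    · exact Or.inr (by simpa using h)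
  · rintro (rfl | h)
    · exact Or.inl rfl
    · exact Or.inr (by simpa using h)

lemma pv_block_eq (domain : String) :
    pvBlock.any (fun bad => domain == bad || PySem.Str.endswith domain ("." ++ bad))
      = (pvSuffixes domain).any (fun s => PySem.Set.contains pvBlockSet s) := by
  rw [PySem.List.any_congr_mem (g := fun bad => decide (bad ∈ pvSuffixes domain))
        (fun bad _ => pv_matches_eq domain bad)]
  rw [Bool.eq_iff_iff]
  have hset : pvBlockSet = pvBlock := by decide
  simp only [List.any_eq_true, decide_eq_true_eq, hset]
  constructor
  · rintro ⟨bad, hb, hs⟩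
    exact ⟨bad, hs, by simpa [PySem.Set.contains] using hb⟩
  · rintro ⟨s, hs, hb⟩
    exact ⟨s, by simpa [PySem.Set.contains] using hb, hs⟩

lemma pv_base_eq (domain : String) :
    pvTrusted.foldl
      (fun base p => if domain == p.1 || PySem.Str.endswith domain ("." ++ p.1) then max base p.2 else base) 0
    = (pvSuffixes domain).foldl (fun base s => max base (PySem.Dict.getD pvTrustedDict s 0)) 0 := by
  have hnodup : pvTrustedDict.keys.Nodup := by decide
  rw [PySem.List.foldl_congr_mem _ _
        (fun base p => if p.1 ∈ pvSuffixes domain then max base p.2 else base) _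
        (fun acc p _ => by rw [pv_matches_eq]; by_cases h : p.1 ∈ pvSuffixes domain <;> simp [h])]
  rw [PySem.List.foldl_ite_eq_foldl_filter (p := fun p : String × Int => p.1 ∈ pvSuffixes domain)
        (f := fun base p => max base p.2)]
  set L := pvTrusted.filter (fun p => decide (p.1 ∈ pvSuffixes domain)) with hL
  apply le_antisymm
  · apply pv_foldl_max_le L Prod.snd 0
    · exact (PySem.List.le_foldl_max_int (pvSuffixes domain) _ 0).1
    · intro p hp
      have hmem : p ∈ pvTrusted ∧ p.1 ∈ pvSuffixes domain := by
        simpa using List.mem_filter.mp hp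
      have hget : pvTrustedDict.getD p.1 0 = p.2 :=
        PySem.Dict.getD_of_mem_items pvTrustedDict hmem.1 hnodup 0
      calc p.2 = pvTrustedDict.getD p.1 0 := hget.symm
        _ ≤ _ := (PySem.List.le_foldl_max_int (pvSuffixes domain) _ 0).2 p.1 hmem.2
  · apply pv_foldl_max_le (pvSuffixes domain) (fun s => PySem.Dict.getD pvTrustedDict s 0) 0
    · exact (PySem.List.le_foldl_max_int L Prod.snd 0).1
    · intro s hs
      rcases hv : pvTrustedDict.get? s with _ | v
      · rw [PySem.Dict.getD_eq_get?_getD, hv]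
        exact (PySem.List.le_foldl_max_int L Prod.snd 0).1
      · have hitems : (s, v) ∈ pvTrusted :=
          PySem.Dict.mem_items_of_get?_eq_some pvTrustedDict hv
        have hmemL : (s, v) ∈ L := by
          rw [hL]; exact List.mem_filter.mpr ⟨hitems, by simpa using hs⟩
        rw [PySem.Dict.getD_eq_get?_getD, hv]
        exact (PySem.List.le_foldl_max_int L Prod.snd 0).2 (s, v) hmemL

-- ===== VERDICT (by name: the statement is the Claim_ definition above) =====
theorem domain_base_score_py_spec : Claim_equal_domain_base_score_py := by
  intro domain _
  show domain_base_score_py domain = domain_base_score_py_alt domain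
  unfold domain_base_score_py domain_base_score_py_alt
  by_cases hempty : domain = ""
  · subst hempty; decide
  · simp only [hempty, if_false, pv_block_eq, pv_base_eq]
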